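-- pv_equiv track=rewrite | github.com/magnolia0713/algo | 백준/Silver/1713. 후보 추천하기/후보 추천하기.py | candidate_sorting
-- ===== SOURCE A (Python) =====
-- def candidate_sorting(N, referred_user, referred_list):
--
--     candidate_list = []
--     for i in range(referred_user):
--         updated = False
--
--         for j in candidate_list:
--             if referred_list[i] == j[0]:
--                 j[1] += 1
--                 updated = True
--                 break
--
--         if not updated:
--
--             if len(candidate_list) < N:
--                 candidate_list.append([referred_list[i], 1, i])
--
--             else:
--                 min_a = min(range(N), key=lambda k: (candidate_list[k][1], candidate_list[k][2]))
--
--                 candidate_list[min_a] = [referred_list[i], 1, i]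
--     final_list = []
--
--     for l in range(len(candidate_list)):
--         final_list.append(candidate_list[l][0])
--
--     final_list.sort()
--     return(final_list)
-- ===== SOURCE B (Python) =====
-- def _sorted_insert(order, item):
--     # insert item into the ascending list 'order' keeping it sorted
--     k = 0
--     while k < len(order) and order[k] < item:
--         k += 1
--     order.insert(k, item)
--
--
-- def candidate_sorting(N, referred_user, referred_list):
--     # frame: candidate -> (count, entry time); order: the same entries as
--     # (count, entry time, candidate) kept sorted ascending, so the eviction
--     # victim is always order[0] -- no minimum scan is ever performed.
--     frame = {}
--     order = []
--     for i in range(referred_user):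
--         c = referred_list[i]
--         if c in frame:
--             cnt, t = frame[c]
--             order.remove((cnt, t, c))
--             frame[c] = (cnt + 1, t)
--             _sorted_insert(order, (cnt + 1, t, c))
--         else:
--             if len(frame) >= N:
--                 _, _, victim = order.pop(0)
--                 del frame[victim]
--             frame[c] = (1, i)
--             _sorted_insert(order, (1, i, c))
--     return sorted(frame)
-- ===== Notes on version B (the rewrite author's own statement) =====
-- stated objective: alternative
-- what changed: B keeps the frame as a dict plus an eviction queue of (count, entry-time, candidate) triples maintained in ascending order, so the victim is always the queue head: A's per-miss minimum scan over indices and A's linear scan of the candidate list per referral both disappear, replaced by ordered-queue maintenance.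
import Mathlib
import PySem

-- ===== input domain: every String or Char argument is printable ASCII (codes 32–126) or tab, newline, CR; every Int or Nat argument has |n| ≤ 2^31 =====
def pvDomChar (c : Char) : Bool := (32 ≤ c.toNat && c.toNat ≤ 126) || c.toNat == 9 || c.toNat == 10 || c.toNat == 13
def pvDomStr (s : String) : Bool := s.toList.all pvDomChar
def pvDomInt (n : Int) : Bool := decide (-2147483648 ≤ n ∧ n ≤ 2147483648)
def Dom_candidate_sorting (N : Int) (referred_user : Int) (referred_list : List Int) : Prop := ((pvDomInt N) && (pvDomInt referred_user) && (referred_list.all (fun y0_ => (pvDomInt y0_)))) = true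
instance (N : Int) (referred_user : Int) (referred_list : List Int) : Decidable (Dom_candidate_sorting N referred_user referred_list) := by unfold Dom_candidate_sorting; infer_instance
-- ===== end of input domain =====

-- B replaces A's unsorted candidate list (scanned once per referral for the candidate and
-- once per miss for the (count,index)-minimum) by a dict for membership plus an eviction
-- queue kept sorted ascending, whose head is always the victim; objective: alternative.

-- ===== PORT A =====
-- inner 'for j in candidate_list: if referred_list[i] == j[0]: j[1] += 1; updated = True; break'
def pvAInner (c : Int) : List (Int × Int × Int) → (List (Int × Int × Int) × Bool)
  | [] => ([], false)
  | j :: rest =>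
    if c = j.1 then ((j.1, j.2.1 + 1, j.2.2) :: rest, true)
    else
      let r := pvAInner c rest
      (j :: r.1, r.2)

-- one iteration of A's main loop; indices produced by the loop are in range under Pre_
def pvAStep (N : Int) (rl : List Int) (cl : List (Int × Int × Int)) (i : Int) : List (Int × Int × Int) :=
  let c := PySem.List.pyGetD rl i 0
  let r := pvAInner c cl
  if r.2 then r.1
  else if (r.1.length : Int) < N then r.1 ++ [(c, 1, i)]
  else
    let min_a := (PySem.List.min2? (PySem.List.pyRange 0 N)
        (fun k => (PySem.List.pyGetD r.1 k (0, 0, 0)).2.1)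
        (fun k => (PySem.List.pyGetD r.1 k (0, 0, 0)).2.2)).getD 0
    PySem.List.pySetD r.1 min_a (c, 1, i)

def candidate_sorting (N : Int) (referred_user : Int) (referred_list : List Int) : List Int :=
  let cl := (PySem.List.pyRange 0 referred_user).foldl (pvAStep N referred_list) []
  let fl := (PySem.List.pyRange 0 (PySem.List.len cl)).foldl
      (fun fl l => fl ++ [(PySem.List.pyGetD cl l (0, 0, 0)).1]) []
  PySem.List.sorted fl (fun x => x)

-- ===== PORT B =====
-- Python's '<' on (Int, Int, Int) tuples (lexicographic)
def pvTLt (p q : Int × Int × Int) : Bool :=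
  decide (p.1 < q.1) || (p.1 == q.1 &&
    (decide (p.2.1 < q.2.1) || (p.2.1 == q.2.1 && decide (p.2.2 < q.2.2))))

-- _sorted_insert: walk past the elements < item, insert there
def pvInsort (item : Int × Int × Int) : List (Int × Int × Int) → List (Int × Int × Int)
  | [] => [item]
  | x :: rest => if pvTLt x item then x :: pvInsort item rest else item :: x :: rest

-- one iteration of B's loop over (frame : candidate ↦ (count, entry time), order : sorted queue)
def pvBStep (N : Int) (rl : List Int)
    (s : PySem.Dict Int (Int × Int) × List (Int × Int × Int)) (i : Int) :
    PySem.Dict Int (Int × Int) × List (Int × Int × Int) :=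
  let c := PySem.List.pyGetD rl i 0
  let frame := s.1
  let order := s.2
  if frame.contains c then
    let p := frame.getD c (0, 0)
    let order1 := (PySem.List.remove? order (p.1, p.2, c)).getD order
    (frame.insert c (p.1 + 1, p.2), pvInsort (p.1 + 1, p.2, c) order1)
  else
    let s1 :=
      if ((frame.size : ℕ) : Int) ≥ N then
        let victim := (order.headD (0, 0, 0)).2.2   -- order.pop(0): head is the victim
        (frame.erase victim, order.tail)
      else (frame, order)
    (s1.1.insert c (1, i), pvInsort (1, i, c) s1.2)

def candidate_sorting_alt (N : Int) (referred_user : Int) (referred_list : List Int) : List Int :=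
  let s := (PySem.List.pyRange 0 referred_user).foldl (pvBStep N referred_list)
      (PySem.Dict.empty, [])
  PySem.List.sorted s.1.keys (fun x => x)

-- ===== PRECONDITION & SPEC =====
-- Pre_ excludes exactly the inputs where Python A raises: an IndexError when the loop reads
-- past referred_list (0 < referred_user > len), and a ValueError from min() over an empty
-- range when N ≤ 0 and a referral arrives; B raises on the same inputs.
def Pre_candidate_sorting (N : Int) (referred_user : Int) (referred_list : List Int) : Prop :=
  referred_user ≤ 0 ∨ (referred_user ≤ (referred_list.length : Int) ∧ 1 ≤ N)
instance (N : Int) (referred_user : Int) (referred_list : List Int) : Decidable (Pre_candidate_sorting N referred_user referred_list) := by unfold Pre_candidate_sorting; infer_instance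

def pvWitness_candidate_sorting : Int × Int × List Int := (2, 3, [1, 2, 1])

def Spec_candidate_sorting (N : Int) (referred_user : Int) (referred_list : List Int) (out : List Int) : Prop := out = candidate_sorting_alt N referred_user referred_list
instance (N : Int) (referred_user : Int) (referred_list : List Int) (out : List Int) : Decidable (Spec_candidate_sorting N referred_user referred_list out) := by unfold Spec_candidate_sorting; infer_instance

-- ===== CLAIM (what is proved, stated in full; the proofs are below) =====
def Claim_equal_candidate_sorting : Prop := ∀ (N : Int) (referred_user : Int) (referred_list : List Int), Dom_candidate_sorting N referred_user referred_list → Pre_candidate_sorting N referred_user referred_list → Spec_candidate_sorting N referred_user referred_list (candidate_sorting N referred_user referred_list)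

-- ===== LEMMAS AND PROOFS =====

-- strict lexicographic order on (count, index) pairs: what A's min compares
def pvKlt (p q : Int × Int) : Prop := p.1 < q.1 ∨ (p.1 = q.1 ∧ p.2 < q.2)

lemma pvKlt_irrefl (p : Int × Int) : ¬ pvKlt p p := by unfold pvKlt; omega

lemma pvKlt_trans {p q r : Int × Int} (h1 : pvKlt p q) (h2 : pvKlt q r) : pvKlt p r := by
  unfold pvKlt at *; omega

lemma pvKlt_total {p q : Int × Int} (h : ¬ pvKlt p q) : pvKlt q p ∨ p = q := by
  unfold pvKlt at *
  rcases p with ⟨a, b⟩; rcases q with ⟨c, d⟩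
  simp only [Prod.mk.injEq]
  omega

lemma pvKlt_bool {α : Type} (k1 k2 : α → Int) (x m : α) :
    ((decide (k1 x < k1 m) || (!decide (k1 m < k1 x) && decide (k2 x < k2 m))) = true)
    ↔ pvKlt (k1 x, k2 x) (k1 m, k2 m) := by
  unfold pvKlt; simp; omega

lemma pvMinFold_some {α : Type} (k1 k2 : α → Int) :
    ∀ (xs : List α) (a : α), ∃ m,
      List.foldl (fun acc x => match acc with
        | none => some x
        | some mm => if (decide (k1 x < k1 mm) || (!decide (k1 mm < k1 x) && decide (k2 x < k2 mm))) = true then some x else some mm)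
        (some a) xs = some m := by
  intro xs
  induction xs with
  | nil => intro a; exact ⟨a, rfl⟩
  | cons x t ih =>
    intro a
    simp only [List.foldl]
    by_cases hb : (decide (k1 x < k1 a) || (!decide (k1 a < k1 x) && decide (k2 x < k2 a))) = true
    · rw [if_pos hb]; exact ih x
    · rw [if_neg hb]; exact ih a

lemma pvMinFold_good {α : Type} (k1 k2 : α → Int) :
    ∀ (xs : List α) (a m : α),
      List.foldl (fun acc x => match acc with
        | none => some x
        | some mm => if (decide (k1 x < k1 mm) || (!decide (k1 mm < k1 x) && decide (k2 x < k2 mm))) = true then some x else some mm)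
        (some a) xs = some m →
      (m = a ∨ m ∈ xs) ∧ ¬ pvKlt (k1 a, k2 a) (k1 m, k2 m) ∧
        ∀ y ∈ xs, ¬ pvKlt (k1 y, k2 y) (k1 m, k2 m) := by
  intro xs
  induction xs with
  | nil =>
    intro a m h
    simp only [List.foldl] at h
    cases h
    exact ⟨Or.inl rfl, pvKlt_irrefl _, by simp⟩
  | cons x t ih =>
    intro a m h
    simp only [List.foldl] at h
    by_cases hb : (decide (k1 x < k1 a) || (!decide (k1 a < k1 x) && decide (k2 x < k2 a))) = true
    · rw [if_pos hb] at h
      have hxa : pvKlt (k1 x, k2 x) (k1 a, k2 a) := (pvKlt_bool k1 k2 x a).mp hb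
      obtain ⟨hmem, hxm, hall⟩ := ih x m h
      refine ⟨?_, ?_, ?_⟩
      · rcases hmem with h' | h' <;> simp [h']
      · intro ham
        exact hxm (pvKlt_trans hxa ham)
      · intro y hy
        rcases List.mem_cons.mp hy with h' | h'
        · rw [h']; exact hxm
        · exact hall y h'
    · rw [if_neg hb] at h
      have hxa : ¬ pvKlt (k1 x, k2 x) (k1 a, k2 a) := fun hk => hb ((pvKlt_bool k1 k2 x a).mpr hk)
      obtain ⟨hmem, ham, hall⟩ := ih a m h
      refine ⟨?_, ham, ?_⟩
      · rcases hmem with h' | h' <;> simp [h']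
      · intro y hy
        rcases List.mem_cons.mp hy with h' | h'
        · subst h'
          intro hym
          rcases pvKlt_total hxa with hax | hax
          · exact ham (pvKlt_trans hax hym)
          · exact ham (hax ▸ hym)
        · exact hall y h'

lemma pvMin2_good {α : Type} (k1 k2 : α → Int) (xs : List α) (hne : xs ≠ []) :
    ∃ m, PySem.List.min2? xs k1 k2 = some m ∧ m ∈ xs ∧
      ∀ y ∈ xs, ¬ pvKlt (k1 y, k2 y) (k1 m, k2 m) := by
  cases xs with
  | nil => exact absurd rfl hne
  | cons x t =>
    obtain ⟨m, hm⟩ := pvMinFold_some k1 k2 t x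
    have hmin : PySem.List.min2? (x :: t) k1 k2 = some m := hm
    obtain ⟨hmem, hxm, hall⟩ := pvMinFold_good k1 k2 t x m hm
    refine ⟨m, hmin, ?_, ?_⟩
    · rcases hmem with h' | h' <;> simp [h']
    · intro y hy
      rcases List.mem_cons.mp hy with h' | h'
      · rw [h']; exact hxm
      · exact hall y h'

-- the pointwise update A's inner loop performs when the key is present and keys are unique
def pvUpd (c : Int) (x : Int × Int × Int) : Int × Int × Int :=
  if x.1 = c then (x.1, x.2.1 + 1, x.2.2) else x

lemma pvAInner_of_not_mem (c : Int) (cl : List (Int × Int × Int))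
    (h : c ∉ cl.map (·.1)) : pvAInner c cl = (cl, false) := by
  induction cl with
  | nil => rfl
  | cons j t ih =>
    simp only [List.map_cons, List.mem_cons] at h
    have h1 : c ≠ j.1 := fun hc => h (Or.inl hc)
    have h2 : c ∉ t.map (·.1) := fun hc => h (Or.inr hc)
    simp only [pvAInner, ih h2]
    rw [if_neg h1]

lemma pvAInner_of_mem (c : Int) (cl : List (Int × Int × Int))
    (hn : (cl.map (·.1)).Nodup) (h : c ∈ cl.map (·.1)) :
    pvAInner c cl = (cl.map (pvUpd c), true) := by
  induction cl with
  | nil => simp at h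
  | cons j t ih =>
    simp only [List.map_cons, List.nodup_cons] at hn
    by_cases hc : c = j.1
    · have ht : ∀ x ∈ t, pvUpd c x = x := by
        intro x hx
        unfold pvUpd
        rw [if_neg]
        intro hxc
        exact hn.1 (hc ▸ hxc ▸ List.mem_map_of_mem hx)
      simp only [pvAInner, if_pos hc, List.map_cons]
      rw [List.map_congr_left ht, List.map_id']
      unfold pvUpd
      rw [if_pos hc.symm]
    · have hct : c ∈ t.map (·.1) := by
        rcases List.mem_cons.mp h with h' | h'
        · exact absurd h' hc
        · exact h'
      simp only [pvAInner, if_neg hc, ih hn.2 hct, List.map_cons]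
      unfold pvUpd
      rw [if_neg (fun hj => hc hj.symm)]

lemma pvUpd_fst (c : Int) (x : Int × Int × Int) : (pvUpd c x).1 = x.1 := by
  unfold pvUpd; split <;> rfl

lemma pvUpd_idx (c : Int) (x : Int × Int × Int) : (pvUpd c x).2.2 = x.2.2 := by
  unfold pvUpd; split <;> rfl

-- value lookup in a keys-Nodup association list is unique
lemma pvVal_unique {l : List (Int × Int × Int)} (hn : (l.map (·.1)).Nodup)
    {p q : Int × Int × Int} (hp : p ∈ l) (hq : q ∈ l) (h : p.1 = q.1) : p = q :=
  List.inj_on_of_nodup_map hn hp hq h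

lemma pvFoldl_append_map (cl : List (Int × Int × Int)) :
    ∀ acc : List Int, List.foldl (fun fl (x : Int × Int × Int) => fl ++ [x.1]) acc cl
      = acc ++ cl.map (·.1) := by
  induction cl with
  | nil => intro acc; simp
  | cons x t ih => intro acc; simp [List.foldl, ih]

lemma pvRange_nil {a b : Int} (h : b ≤ a) : PySem.List.pyRange a b = [] := by
  unfold PySem.List.pyRange
  simp only [if_neg (by norm_num : ¬ (1:Int) = 0)]
  rw [if_pos (by norm_num), if_neg (by omega)]
  simp

-- the (count, time, candidate) view of a frame entry, as kept in B's eviction queue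
def pvSw (x : Int × Int × Int) : Int × Int × Int := (x.2.1, x.2.2, x.1)

lemma pvSw_inj : Function.Injective pvSw := by
  intro a b h
  rcases a with ⟨a1, a2, a3⟩; rcases b with ⟨b1, b2, b3⟩
  simp only [pvSw, Prod.mk.injEq] at h ⊢
  tauto

lemma pvTLt_trans {a b c : Int × Int × Int} (h1 : pvTLt a b = true) (h2 : pvTLt b c = true) :
    pvTLt a c = true := by
  simp only [pvTLt, Bool.or_eq_true, Bool.and_eq_true, decide_eq_true_eq, beq_iff_eq] at *
  omega

lemma pvTLt_total' {a x : Int × Int × Int} (h : ¬ pvTLt x a = true) (hne : x ≠ a) :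
    pvTLt a x = true := by
  rcases a with ⟨a1, a2, a3⟩; rcases x with ⟨x1, x2, x3⟩
  have hne' : ¬(x1 = a1 ∧ x2 = a2 ∧ x3 = a3) := by
    intro hh
    exact hne (by simp [hh.1, hh.2.1, hh.2.2])
  simp only [pvTLt, Bool.or_eq_true, Bool.and_eq_true, decide_eq_true_eq, beq_iff_eq] at h ⊢
  omega

lemma pvInsort_perm (a : Int × Int × Int) (l : List (Int × Int × Int)) :
    (pvInsort a l).Perm (a :: l) := by
  induction l with
  | nil => simp [pvInsort]
  | cons x t ih =>
    simp only [pvInsort]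
    split
    · exact (ih.cons x).trans (List.Perm.swap a x t)
    · exact List.Perm.refl _

lemma pvInsort_pairwise (a : Int × Int × Int) (l : List (Int × Int × Int))
    (hs : l.Pairwise (fun p q => pvTLt p q = true)) (hne : ∀ x ∈ l, x ≠ a) :
    (pvInsort a l).Pairwise (fun p q => pvTLt p q = true) := by
  induction l with
  | nil => simp [pvInsort]
  | cons x t ih =>
    rcases List.pairwise_cons.mp hs with ⟨hx, ht⟩
    simp only [pvInsort]
    split
    · rename_i hlt
      refine List.pairwise_cons.mpr ⟨?_, ih ht (fun y hy => hne y (List.mem_cons_of_mem x hy))⟩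
      intro y hy
      rcases List.mem_cons.mp ((pvInsort_perm a t).mem_iff.mp hy) with h' | h'
      · rw [h']; exact hlt
      · exact hx y h'
    · rename_i hnlt
      have hax : pvTLt a x = true := pvTLt_total' hnlt (hne x (List.mem_cons_self))
      refine List.pairwise_cons.mpr ⟨?_, hs⟩
      intro y hy
      rcases List.mem_cons.mp hy with h' | h'
      · rw [h']; exact hax
      · exact pvTLt_trans hax (hx y h')

-- the step preserves the simulation invariant between A's candidate list and B's state
lemma pvStep_inv (N : Int) (rl : List Int) (hN : 1 ≤ N) (i : Int)
    (cl : List (Int × Int × Int)) (d : PySem.Dict Int (Int × Int))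
    (order : List (Int × Int × Int))
    (hperm : cl.Perm d.items) (hkey : (cl.map (·.1)).Nodup)
    (hidx : (cl.map (·.2.2)).Nodup) (hbnd : ∀ x ∈ cl, x.2.2 < i)
    (hlen : (cl.length : Int) ≤ N)
    (hord : order.Perm (cl.map pvSw))
    (hsort : order.Pairwise (fun p q => pvTLt p q = true)) :
    (pvAStep N rl cl i).Perm (pvBStep N rl (d, order) i).1.items ∧
    ((pvAStep N rl cl i).map (·.1)).Nodup ∧
    ((pvAStep N rl cl i).map (·.2.2)).Nodup ∧
    (∀ x ∈ pvAStep N rl cl i, x.2.2 < i + 1) ∧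
    ((pvAStep N rl cl i).length : Int) ≤ N ∧
    (pvBStep N rl (d, order) i).2.Perm ((pvAStep N rl cl i).map pvSw) ∧
    (pvBStep N rl (d, order) i).2.Pairwise (fun p q => pvTLt p q = true) := by
  have hkeyd : (d.items.map (·.1)).Nodup := ((hperm.map (·.1)).nodup_iff).mp hkey
  have hkeysnodup : d.keys.Nodup := hkeyd
  have hclnodup : cl.Nodup := List.Nodup.of_map _ hkey
  have hswnodup : (cl.map pvSw).Nodup := hclnodup.map pvSw_inj
  have htinj : ∀ {p q : Int × Int × Int}, p ∈ cl → q ∈ cl → p.2.2 = q.2.2 → p = q :=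
    fun hp hq h => List.inj_on_of_nodup_map hidx hp hq h
  set c := PySem.List.pyGetD rl i 0 with hc
  by_cases hmem : c ∈ cl.map (·.1)
  · -- UPDATE case: the candidate is already in the frame
    have hA : pvAStep N rl cl i = cl.map (pvUpd c) := by
      simp only [pvAStep, ← hc, pvAInner_of_mem c cl hkey hmem]
      rw [if_pos (by trivial)]
    have hcontains : d.contains c = true := by
      rw [PySem.Dict.contains_iff_mem_keys]
      exact (hperm.map (·.1)).mem_iff.mp hmem
    obtain ⟨x0, hx0mem, hx0⟩ := List.mem_map.mp hmem
    have hx0eq : x0 = (c, x0.2) := by rw [← hx0]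
    have hx0d : (c, x0.2) ∈ d.items := hx0eq ▸ hperm.mem_iff.mp hx0mem
    have hget : d.get? c = some x0.2 := PySem.Dict.get?_of_mem_items d hx0d hkeysnodup
    have hgetD : d.getD c (0, 0) = x0.2 := by
      rw [PySem.Dict.getD_eq_get?_getD, hget]; rfl
    have hitem : ((x0.2.1 : Int), x0.2.2, c) = pvSw x0 := by
      simp [pvSw, hx0]
    have hswmem : pvSw x0 ∈ order := hord.mem_iff.mpr (List.mem_map_of_mem hx0mem)
    have hrm : PySem.List.remove? order (pvSw x0) = some (order.erase (pvSw x0)) :=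
      PySem.List.remove?_eq_some_erase order (pvSw x0) hswmem
    have hBpair : pvBStep N rl (d, order) i
        = (d.insert c (x0.2.1 + 1, x0.2.2),
           pvInsort (x0.2.1 + 1, x0.2.2, c) (order.erase (pvSw x0))) := by
      simp only [pvBStep, ← hc, hcontains, if_true, hgetD, hitem, hrm, Option.getD_some]
    have hBitems : (d.insert c (x0.2.1 + 1, x0.2.2)).items = d.items.map (pvUpd c) := by
      rw [PySem.Dict.items_insert_of_contains d _ hcontains]
      apply List.map_congr_left
      intro p hp
      by_cases hpc : p.1 = c
      · have hpx0 : p = x0 := pvVal_unique hkeyd hp (hperm.mem_iff.mp hx0mem) (by rw [hpc, hx0])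
        subst hpx0
        simp [pvUpd, hpc]
      · simp only [pvUpd, beq_iff_eq, if_neg hpc]
    have hfst : (cl.map (pvUpd c)).map (·.1) = cl.map (·.1) := by
      rw [List.map_map]
      exact List.map_congr_left fun x _ => pvUpd_fst c x
    have hsnd : (cl.map (pvUpd c)).map (·.2.2) = cl.map (·.2.2) := by
      rw [List.map_map]
      exact List.map_congr_left fun x _ => pvUpd_idx c x
    -- pvUpd is the identity off x0
    have hupd_id : ∀ y ∈ cl.erase x0, pvUpd c y = y := by
      intro y hy
      rcases (hclnodup.mem_erase_iff).mp hy with ⟨hyne, hycl⟩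
      unfold pvUpd
      rw [if_neg]
      intro hyc
      exact hyne (pvVal_unique hkey hycl hx0mem (by rw [hyc, hx0]))
    have hupditem : pvSw (pvUpd c x0) = (x0.2.1 + 1, x0.2.2, c) := by
      simp [pvUpd, pvSw, hx0]
    have hmaperase : (cl.map pvSw).erase (pvSw x0) = (cl.erase x0).map pvSw :=
      (List.map_erase pvSw_inj cl).symm
    have hpermA : (cl.map (pvUpd c)).Perm (pvUpd c x0 :: cl.erase x0) := by
      have h1 : cl.Perm (x0 :: cl.erase x0) := List.perm_cons_erase hx0mem
      have h2 := h1.map (pvUpd c)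
      simp only [List.map_cons] at h2
      rw [List.map_congr_left hupd_id, List.map_id'] at h2
      exact h2
    have hordgoal : (pvInsort (x0.2.1 + 1, x0.2.2, c) (order.erase (pvSw x0))).Perm
        ((cl.map (pvUpd c)).map pvSw) := by
      have h1 : (pvInsort (x0.2.1 + 1, x0.2.2, c) (order.erase (pvSw x0))).Perm
          ((x0.2.1 + 1, x0.2.2, c) :: (cl.erase x0).map pvSw) := by
        refine (pvInsort_perm _ _).trans (List.Perm.cons _ ?_)
        rw [← hmaperase]
        exact hord.erase _
      have h2 : ((cl.map (pvUpd c)).map pvSw).Perm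
          ((x0.2.1 + 1, x0.2.2, c) :: (cl.erase x0).map pvSw) := by
        have h3 := hpermA.map pvSw
        simp only [List.map_cons, hupditem] at h3
        exact h3
      exact h1.trans h2.symm
    have hsortgoal : (pvInsort (x0.2.1 + 1, x0.2.2, c) (order.erase (pvSw x0))).Pairwise
        (fun p q => pvTLt p q = true) := by
      apply pvInsort_pairwise
      · exact List.Pairwise.sublist (List.erase_sublist) hsort
      · intro y hy hyeq
        have hy2 : y ∈ (cl.map pvSw).erase (pvSw x0) := (hord.erase _).mem_iff.mp hy
        rcases (hswnodup.mem_erase_iff).mp hy2 with ⟨hyne, hymem⟩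
        obtain ⟨z, hz, hzy⟩ := List.mem_map.mp hymem
        have hzx0 : z = x0 := by
          apply htinj hz hx0mem
          have : y.2.1 = x0.2.2 := by rw [hyeq]
          rw [← hzy] at this
          simpa [pvSw] using this
        apply hyne
        rw [← hzy, hzx0]
      
    refine ⟨?_, ?_, ?_, ?_, ?_, ?_, ?_⟩
    · rw [hA, hBpair]
      show (cl.map (pvUpd c)).Perm (d.insert c (x0.2.1 + 1, x0.2.2)).items
      rw [hBitems]
      exact hperm.map _
    · rw [hA, hfst]; exact hkey
    · rw [hA, hsnd]; exact hidx
    · rw [hA]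
      intro x hx
      obtain ⟨y, hy, rfl⟩ := List.mem_map.mp hx
      rw [pvUpd_idx]
      have := hbnd y hy; omega
    · rw [hA, List.length_map]; exact hlen
    · rw [hA, hBpair]; exact hordgoal
    · rw [hBpair]; exact hsortgoal
  · -- MISS case: candidate not in the frame
    have hA0 : pvAInner c cl = (cl, false) := pvAInner_of_not_mem c cl hmem
    have hcontains : d.contains c = false := by
      rw [Bool.eq_false_iff, Ne, PySem.Dict.contains_iff_mem_keys]
      exact fun h => hmem ((hperm.map (·.1)).mem_iff.mpr h)
    have hsize : ((d.size : ℕ) : Int) = (cl.length : Int) := by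
      simp [PySem.Dict.size, hperm.length_eq]
    have hnewne : ∀ y ∈ order, y ≠ ((1 : Int), i, c) := by
      intro y hy hyeq
      obtain ⟨z, hz, hzy⟩ := List.mem_map.mp (hord.mem_iff.mp hy)
      have h1 : y.2.1 = z.2.2 := by rw [← hzy]; rfl
      have h2 := hbnd z hz
      rw [hyeq] at h1
      simp at h1
      omega
    by_cases hfull : (cl.length : Int) < N
    · -- room in the frame: both append
      have hA : pvAStep N rl cl i = cl ++ [(c, 1, i)] := by
        simp only [pvAStep, ← hc, hA0]
        rw [if_neg (by simp), if_pos hfull]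
      have hBpair : pvBStep N rl (d, order) i
          = (d.insert c (1, i), pvInsort (1, i, c) order) := by
        simp only [pvBStep, ← hc, hcontains, Bool.false_eq_true, if_false]
        rw [if_neg (by rw [hsize]; omega)]
      have hB : (d.insert c (1, i)).items = d.items ++ [(c, (1, i))] :=
        PySem.Dict.items_insert_of_not_contains d _ hcontains
      refine ⟨?_, ?_, ?_, ?_, ?_, ?_, ?_⟩
      · rw [hA, hBpair]
        show (cl ++ [(c, 1, i)]).Perm (d.insert c (1, i)).items
        rw [hB]
        exact hperm.append (List.Perm.refl _)
      · rw [hA]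
        have hp1 : ((cl ++ [(c, 1, i)]).map (fun x : Int × Int × Int => x.1)).Perm
            (((c, 1, i) :: cl).map (fun x : Int × Int × Int => x.1)) :=
          (List.perm_append_singleton (c, 1, i) cl).map _
        rw [hp1.nodup_iff]
        simp only [List.map_cons, List.nodup_cons]
        exact ⟨hmem, hkey⟩
      · rw [hA]
        have hp1 : ((cl ++ [(c, 1, i)]).map (fun x : Int × Int × Int => x.2.2)).Perm
            (((c, 1, i) :: cl).map (fun x : Int × Int × Int => x.2.2)) :=
          (List.perm_append_singleton (c, 1, i) cl).map _
        rw [hp1.nodup_iff]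
        simp only [List.map_cons, List.nodup_cons]
        refine ⟨fun h1 => ?_, hidx⟩
        obtain ⟨y, hy, hyi⟩ := List.mem_map.mp h1
        have h2 : y.2.2 = i := hyi
        have := hbnd y hy
        omega
      · rw [hA]
        intro x hx
        rcases List.mem_append.mp hx with h' | h'
        · have := hbnd x h'; omega
        · simp only [List.mem_singleton] at h'
          subst h'
          exact lt_add_one i
      · rw [hA, List.length_append, List.length_singleton]; push_cast; omega
      · rw [hA, hBpair]
        show (pvInsort (1, i, c) order).Perm ((cl ++ [(c, 1, i)]).map pvSw)
        refine (pvInsort_perm _ _).trans ?_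
        have h1 : ((cl ++ [(c, 1, i)]).map pvSw) = cl.map pvSw ++ [((1 : Int), i, c)] := by
          simp [pvSw]
        rw [h1]
        exact (hord.cons _).trans (List.perm_append_singleton _ _).symm
      · rw [hBpair]
        exact pvInsort_pairwise _ _ hsort hnewne
    · -- frame full: both evict; A scans for the (count, index)-minimum, B pops the queue head
      have hlenN : (cl.length : Int) = N := le_antisymm hlen (not_lt.mp hfull)
      have hrangene : PySem.List.pyRange 0 N ≠ [] := by
        intro h0
        have h1 : (0 : Int) ∈ PySem.List.pyRange 0 N :=
          PySem.List.mem_pyRange_one.mpr ⟨le_refl 0, by omega⟩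
        rw [h0] at h1; simp at h1
      obtain ⟨j, hjeq, hjmem, hjall⟩ :=
        pvMin2_good (fun k => (PySem.List.pyGetD cl k (0, 0, 0)).2.1)
          (fun k => (PySem.List.pyGetD cl k (0, 0, 0)).2.2) (PySem.List.pyRange 0 N) hrangene
      obtain ⟨hj0, hjN⟩ := PySem.List.mem_pyRange_one.mp hjmem
      have hjlen : j.toNat < cl.length := by omega
      have hgetjj : PySem.List.pyGetD cl j (0, 0, 0) = cl[j.toNat]'hjlen := by
        rw [PySem.List.pyGetD_of_nonneg _ _ hj0]
        exact List.getD_eq_getElem cl _ hjlen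
      have hmAmem : cl[j.toNat] ∈ cl := List.getElem_mem hjlen
      have hgoodA : ∀ y ∈ cl, ¬ pvKlt y.2 (cl[j.toNat]'hjlen).2 := by
        intro y hy
        obtain ⟨k, hk, hky⟩ := List.mem_iff_getElem.mp hy
        have hkN : (k : Int) < N := by omega
        have hgetk : PySem.List.pyGetD cl (k : Int) (0, 0, 0) = cl[k]'hk := by
          rw [PySem.List.pyGetD_of_nonneg _ _ (Int.natCast_nonneg k)]
          simp only [Int.toNat_natCast]
          exact List.getD_eq_getElem cl _ hk
        have h1 := hjall (k : Int)
          (PySem.List.mem_pyRange_one.mpr ⟨Int.natCast_nonneg k, hkN⟩)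
        rw [hgetk, hgetjj] at h1
        rw [← hky]
        exact h1
      have hA : pvAStep N rl cl i = cl.set j.toNat (c, 1, i) := by
        simp only [pvAStep, ← hc, hA0]
        rw [if_neg (by simp), if_neg hfull, hjeq]
        simp only [Option.getD_some]
        exact PySem.List.pySetD_of_nonneg cl _ hj0
      -- the queue head is A's victim
      have hlenord : order.length = cl.length := by
        rw [hord.length_eq, List.length_map]
      have hordne : order ≠ [] := by
        intro h0
        rw [h0] at hlenord
        simp at hlenord
        omega
      obtain ⟨h0, tl, rfl⟩ := List.exists_cons_of_ne_nil hordne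
      have hswmem : pvSw (cl[j.toNat]'hjlen) ∈ h0 :: tl :=
        hord.mem_iff.mpr (List.mem_map_of_mem hmAmem)
      rcases List.pairwise_cons.mp hsort with ⟨hhd, htl⟩
      have hhead : h0 = pvSw (cl[j.toNat]'hjlen) := by
        rcases List.mem_cons.mp hswmem with h' | h'
        · exact h'.symm
        · exfalso
          have hlt : pvTLt h0 (pvSw (cl[j.toNat]'hjlen)) = true := hhd _ h'
          obtain ⟨y, hy, hsy⟩ := List.mem_map.mp
            (hord.mem_iff.mp (List.mem_cons_self : h0 ∈ h0 :: tl))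
          have hgy := hgoodA y hy
          set m := cl[j.toNat]'hjlen with hm
          rw [← hsy] at hlt
          have hcomp : y.2.1 < m.2.1 ∨ (y.2.1 = m.2.1 ∧ (y.2.2 < m.2.2 ∨ (y.2.2 = m.2.2 ∧ y.1 < m.1))) := by
            simpa [pvTLt, pvSw] using hlt
          have hnk : ¬ (y.2.1 < m.2.1 ∨ (y.2.1 = m.2.1 ∧ y.2.2 < m.2.2)) := by
            simpa [pvKlt] using hgy
          have hteq : y.2.2 = m.2.2 := by tauto
          have hym : y = m := htinj hy hmAmem hteq
          rw [hym] at hcomp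
          omega
      have hBpair : pvBStep N rl (d, h0 :: tl) i
          = ((d.erase (cl[j.toNat]'hjlen).1).insert c (1, i), pvInsort (1, i, c) tl) := by
        simp only [pvBStep, ← hc, hcontains, Bool.false_eq_true, if_false]
        rw [if_pos (by rw [hsize]; omega)]
        simp only [List.headD_cons, List.tail_cons, hhead]
        rfl
      have hcerase : (d.erase (cl[j.toNat]'hjlen).1).contains c = false := by
        rw [Bool.eq_false_iff, Ne, PySem.Dict.contains_iff_mem_keys]
        intro h1
        obtain ⟨p, hp, hpc⟩ := List.mem_map.mp h1
        have hp' : p ∈ d.items := List.mem_of_mem_filter hp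
        exact hmem ((hperm.map (·.1)).mem_iff.mpr (hpc ▸ List.mem_map_of_mem hp'))
      have hmAd : cl[j.toNat]'hjlen ∈ d.items := hperm.mem_iff.mp hmAmem
      have hB : ((d.erase (cl[j.toNat]'hjlen).1).insert c (1, i)).items
          = (d.items.filter (fun p => !(p.1 == (cl[j.toNat]'hjlen).1))) ++ [(c, (1, i))] :=
        PySem.Dict.items_insert_of_not_contains _ _ hcerase
      have hitemsnodup : d.items.Nodup := List.Nodup.of_map _ hkeyd
      have hfilter : d.items.filter (fun p => !(p.1 == (cl[j.toNat]'hjlen).1))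
          = d.items.erase (cl[j.toNat]'hjlen) := by
        rw [List.Nodup.erase_eq_filter hitemsnodup]
        apply List.filter_congr
        intro p hp
        by_cases hpw : p.1 = (cl[j.toNat]'hjlen).1
        · have hpm : p = cl[j.toNat]'hjlen := pvVal_unique hkeyd hp hmAd hpw
          subst hpm
          simp
        · have hne : p ≠ cl[j.toNat]'hjlen := fun h => hpw (by rw [h])
          have h1 : (p.1 == (cl[j.toNat]'hjlen).1) = false := beq_eq_false_iff_ne.mpr hpw
          have h2 : (p != cl[j.toNat]'hjlen) = true := bne_iff_ne.mpr hne
          rw [h1, h2]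
          rfl
      have hdecomp : cl = cl.take j.toNat ++ (cl[j.toNat]'hjlen) :: cl.drop (j.toNat + 1) := by
        conv_lhs => rw [← List.take_append_drop j.toNat cl]
        congr 1
        exact (List.getElem_cons_drop hjlen).symm
      have hset : cl.set j.toNat (c, 1, i)
          = cl.take j.toNat ++ (c, 1, i) :: cl.drop (j.toNat + 1) :=
        List.set_eq_take_cons_drop _ hjlen
      have hpermE : (cl.take j.toNat ++ cl.drop (j.toNat + 1)).Perm
          (d.items.erase (cl[j.toNat]'hjlen)) := by
        have p2 : cl.Perm ((cl[j.toNat]'hjlen) :: (cl.take j.toNat ++ cl.drop (j.toNat + 1))) := by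
          conv_lhs => rw [hdecomp]
          exact List.perm_middle
        have p3 : d.items.Perm ((cl[j.toNat]'hjlen) :: d.items.erase (cl[j.toNat]'hjlen)) :=
          List.perm_cons_erase hmAd
        exact (p2.symm.trans (hperm.trans p3)).cons_inv
      have hpermSet : (cl.set j.toNat (c, 1, i)).Perm
          ((c, 1, i) :: (cl.take j.toNat ++ cl.drop (j.toNat + 1))) := by
        rw [hset]; exact List.perm_middle
      have hsubE : (cl.take j.toNat ++ cl.drop (j.toNat + 1)).Sublist cl := by
        rw [← List.eraseIdx_eq_take_drop_succ]
        exact List.eraseIdx_sublist cl j.toNat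
      have hordtl : tl.Perm ((cl.take j.toNat ++ cl.drop (j.toNat + 1)).map pvSw) := by
        have h1 : (cl.map pvSw).Perm
            (pvSw (cl[j.toNat]'hjlen) :: (cl.take j.toNat ++ cl.drop (j.toNat + 1)).map pvSw) := by
          conv_lhs => rw [hdecomp]
          simp only [List.map_append, List.map_cons]
          exact List.perm_middle
        have h2 : (h0 :: tl).Perm
            (pvSw (cl[j.toNat]'hjlen) :: (cl.take j.toNat ++ cl.drop (j.toNat + 1)).map pvSw) :=
          hord.trans h1
        rw [hhead] at h2
        exact h2.cons_inv
      refine ⟨?_, ?_, ?_, ?_, ?_, ?_, ?_⟩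
      · rw [hA, hBpair]
        show (cl.set j.toNat (c, 1, i)).Perm ((d.erase (cl[j.toNat]'hjlen).1).insert c (1, i)).items
        rw [hB, hfilter]
        exact hpermSet.trans ((hpermE.cons _).trans (List.perm_append_singleton _ _).symm)
      · rw [hA, (hpermSet.map (·.1)).nodup_iff]
        simp only [List.map_cons, List.nodup_cons]
        refine ⟨?_, (hsubE.map (·.1)).nodup hkey⟩
        intro h1
        exact hmem ((hsubE.map (·.1)).subset h1)
      · rw [hA, (hpermSet.map (·.2.2)).nodup_iff]
        simp only [List.map_cons, List.nodup_cons]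
        refine ⟨?_, (hsubE.map (·.2.2)).nodup hidx⟩
        intro h1
        obtain ⟨y, hy, hyi⟩ := List.mem_map.mp ((hsubE.map (·.2.2)).subset h1)
        have := hbnd y hy
        omega
      · rw [hA]
        intro x hx
        rw [hpermSet.mem_iff] at hx
        rcases List.mem_cons.mp hx with h' | h'
        · subst h'
          exact lt_add_one i
        · have := hbnd x (hsubE.subset h'); omega
      · rw [hA, List.length_set]; exact hlen
      · rw [hA, hBpair]
        show (pvInsort (1, i, c) tl).Perm ((cl.set j.toNat (c, 1, i)).map pvSw)
        refine (pvInsort_perm _ _).trans ?_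
        have h1 : ((cl.set j.toNat (c, 1, i)).map pvSw).Perm
            (((1 : Int), i, c) :: (cl.take j.toNat ++ cl.drop (j.toNat + 1)).map pvSw) := by
          rw [hset]
          simp only [List.map_append, List.map_cons]
          show (_ ++ pvSw (c, 1, i) :: _).Perm _
          have : pvSw (c, 1, i) = ((1 : Int), i, c) := rfl
          rw [this]
          exact List.perm_middle
        exact (hordtl.cons _).trans h1.symm
      · rw [hBpair]
        exact pvInsort_pairwise _ _ htl
          (fun y hy => hnewne y (List.mem_cons_of_mem h0 hy))

lemma pvLoop (N : Int) (rl : List Int) (hN : 1 ≤ N) (k : ℕ) :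
    ((PySem.List.pyRange 0 (k : Int)).foldl (pvAStep N rl) []).Perm
      (((PySem.List.pyRange 0 (k : Int)).foldl (pvBStep N rl) (PySem.Dict.empty, [])).1.items) ∧
    (((PySem.List.pyRange 0 (k : Int)).foldl (pvAStep N rl) []).map (·.1)).Nodup ∧
    (((PySem.List.pyRange 0 (k : Int)).foldl (pvAStep N rl) []).map (·.2.2)).Nodup ∧
    (∀ x ∈ (PySem.List.pyRange 0 (k : Int)).foldl (pvAStep N rl) [], x.2.2 < (k : Int)) ∧
    ((((PySem.List.pyRange 0 (k : Int)).foldl (pvAStep N rl) []).length : Int) ≤ N) ∧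
    (((PySem.List.pyRange 0 (k : Int)).foldl (pvBStep N rl) (PySem.Dict.empty, [])).2.Perm
      (((PySem.List.pyRange 0 (k : Int)).foldl (pvAStep N rl) []).map pvSw)) ∧
    (((PySem.List.pyRange 0 (k : Int)).foldl (pvBStep N rl) (PySem.Dict.empty, [])).2.Pairwise
      (fun p q => pvTLt p q = true)) := by
  induction k with
  | zero =>
    rw [show ((0 : ℕ) : Int) = 0 from rfl, pvRange_nil (le_refl 0)]
    simp only [List.foldl_nil]
    exact ⟨List.Perm.refl _, List.nodup_nil, List.nodup_nil, by simp, by simp; omega,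
      List.Perm.refl _, List.Pairwise.nil⟩
  | succ k ih =>
    have hsplit : PySem.List.pyRange 0 ((k + 1 : ℕ) : Int)
        = PySem.List.pyRange 0 (k : Int) ++ [(k : Int)] := by
      rw [PySem.List.pyRange_one_append 0 (k : Int) ((k + 1 : ℕ) : Int)
        (Int.natCast_nonneg k) (by push_cast; omega)]
      congr 1
      rw [PySem.List.pyRange_one_cons (by push_cast; omega),
        pvRange_nil (by push_cast; omega)]
    rw [hsplit]
    simp only [List.foldl_append, List.foldl_cons, List.foldl_nil]
    obtain ⟨h1, h2, h3, h4, h5, h6, h7⟩ := ih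
    obtain ⟨g1, g2, g3, g4, g5, g6, g7⟩ := pvStep_inv N rl hN (k : Int) _ _ _ h1 h2 h3 h4 h5 h6 h7
    refine ⟨g1, g2, g3, ?_, g5, g6, g7⟩
    intro x hx
    have := g4 x hx
    push_cast
    omega

-- ===== VERDICT (by name: the statement is the Claim_ definition above) =====
theorem candidate_sorting_spec : Claim_equal_candidate_sorting := by
  intro N ru rl _ hpre
  unfold Spec_candidate_sorting
  by_cases hru : ru ≤ 0
  · unfold candidate_sorting candidate_sorting_alt
    rw [pvRange_nil hru]
    rfl
  · have h0ru : 0 ≤ ru := by omega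
    have hN : 1 ≤ N := by
      rcases hpre with h | h
      · omega
      · exact h.2
    have hk : ((ru.toNat : ℕ) : Int) = ru := Int.toNat_of_nonneg h0ru
    unfold candidate_sorting candidate_sorting_alt
    rw [← hk]
    obtain ⟨hperm, hkey, -, -, -, -, -⟩ := pvLoop N rl hN ru.toNat
    set cl := (PySem.List.pyRange 0 ((ru.toNat : ℕ) : Int)).foldl (pvAStep N rl) [] with hcl
    set ss := (PySem.List.pyRange 0 ((ru.toNat : ℕ) : Int)).foldl (pvBStep N rl)
      (PySem.Dict.empty, ([] : List (Int × Int × Int))) with hss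
    have hfl : (PySem.List.pyRange 0 (PySem.List.len cl)).foldl
        (fun fl l => fl ++ [(PySem.List.pyGetD cl l (0, 0, 0)).1]) [] = cl.map (·.1) := by
      have h1 := PySem.List.foldl_pyRange_pyGetD cl ((0, 0, 0) : Int × Int × Int)
        (fun acc (x : Int × Int × Int) => acc ++ [x.1]) ([] : List Int) (a := 0) le_rfl
      simp only [Int.toNat_zero, List.drop_zero] at h1
      exact h1.trans ((pvFoldl_append_map cl []).trans (by simp))
    show PySem.List.sorted ((PySem.List.pyRange 0 (PySem.List.len cl)).foldl
        (fun fl l => fl ++ [(PySem.List.pyGetD cl l (0, 0, 0)).1]) []) (fun x => x)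
      = PySem.List.sorted ss.1.keys (fun x => x)
    rw [hfl]
    exact PySem.List.sorted_eq_sorted_of_perm _ _ _ (fun a b h => h) (hperm.map (·.1))
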